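-- pv_equiv track=rewrite | github.com/Trebolium/VocalTechClass | utils.py | substring_inclusion
-- ===== SOURCE A (Python) =====
-- def substring_inclusion(main_list, include_list):
--     filtered_list = []
--     for f_path in main_list:
--         inclusion_found = False
--         for inclusion in include_list:
--             if inclusion in f_path:
--                 inclusion_found = True
--         if inclusion_found == True:
--             filtered_list.append(f_path)
--     return filtered_list
-- ===== SOURCE B (Python) =====
-- def substring_inclusion(main_list, include_list):
--     matched = set()
--     for inclusion in include_list:
--         for i, f_path in enumerate(main_list):
--             if i not in matched and inclusion in f_path:
--                 matched.add(i)
--     return [f_path for i, f_path in enumerate(main_list) if i in matched]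
-- ===== Notes on version B (the rewrite author's own statement) =====
-- stated objective: alternative
-- what changed: Loops are inverted: instead of scanning every pattern per path, B scans the paths once per pattern, records matched indices in a set with early skip of already-matched indices, and emits the matched paths in one final pass.
import Mathlib
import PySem

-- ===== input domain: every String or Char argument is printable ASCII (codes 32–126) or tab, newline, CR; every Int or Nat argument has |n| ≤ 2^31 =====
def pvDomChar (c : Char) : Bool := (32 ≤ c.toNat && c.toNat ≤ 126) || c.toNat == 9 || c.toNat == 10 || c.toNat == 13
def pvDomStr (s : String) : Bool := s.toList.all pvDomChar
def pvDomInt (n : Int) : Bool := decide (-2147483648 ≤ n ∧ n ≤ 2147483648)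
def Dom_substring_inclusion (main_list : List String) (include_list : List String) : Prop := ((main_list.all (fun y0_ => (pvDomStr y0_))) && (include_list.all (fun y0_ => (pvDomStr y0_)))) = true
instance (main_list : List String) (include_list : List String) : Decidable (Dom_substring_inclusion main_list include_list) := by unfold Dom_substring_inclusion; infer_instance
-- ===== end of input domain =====

-- B inverts A's loop nesting: patterns outer, paths inner, matched indices kept in a set; equal return value, same asymptotic cost.

-- ===== PORT A =====
-- for f_path in main_list: scan ALL inclusions (no break), append if any matched
def substring_inclusion (main_list : List String) (include_list : List String) : List String :=
  main_list.foldl (fun filtered_list f_path =>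
    let inclusion_found :=
      include_list.foldl (fun found inclusion =>
        if PySem.Str.isIn inclusion f_path then true else found) false
    if inclusion_found == true then filtered_list ++ [f_path] else filtered_list) []

-- ===== PORT B =====
-- for inclusion in include_list: mark unmatched indices i with inclusion in main_list[i]
def substring_inclusion_alt (main_list : List String) (include_list : List String) : List String :=
  let matched : PySem.Set Int :=
    include_list.foldl (fun matched inclusion =>
      (PySem.List.enumerate main_list).foldl (fun matched p =>
        if !(PySem.Set.contains matched p.1) && PySem.Str.isIn inclusion p.2
        then PySem.Set.add matched p.1 else matched) matched) PySem.Set.empty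
  ((PySem.List.enumerate main_list).filter (fun p => PySem.Set.contains matched p.1)).map (·.2)

-- ===== PRECONDITION & SPEC =====
def Spec_substring_inclusion (main_list : List String) (include_list : List String) (out : List String) : Prop := out = substring_inclusion_alt main_list include_list
instance (main_list : List String) (include_list : List String) (out : List String) : Decidable (Spec_substring_inclusion main_list include_list out) := by unfold Spec_substring_inclusion; infer_instance

-- ===== CLAIM (what is proved, stated in full; the proofs are below) =====
def Claim_equal_substring_inclusion : Prop := ∀ (main_list : List String) (include_list : List String), Dom_substring_inclusion main_list include_list → Spec_substring_inclusion main_list include_list (substring_inclusion main_list include_list)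

-- ===== LEMMAS AND PROOFS =====

-- A's inner loop is `any`
theorem si_inner_any (f : String) (il : List String) (b : Bool) :
    il.foldl (fun found inclusion => if PySem.Str.isIn inclusion f then true else found) b
      = (b || il.any (fun inclusion => PySem.Str.isIn inclusion f)) := by
  induction il generalizing b with
  | nil => simp
  | cons x t ih =>
      simp only [List.foldl_cons, List.any_cons, ih]
      by_cases h : PySem.Str.isIn x f = true <;> simp [Bool.or_comm, Bool.or_assoc]

-- A computes the filter of paths containing some pattern
theorem si_A_eq_filter (ml il : List String) :
    substring_inclusion ml il
      = ml.filter (fun f => il.any (fun inclusion => PySem.Str.isIn inclusion f)) := by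
  unfold substring_inclusion
  simp only [si_inner_any, Bool.false_or, beq_iff_eq]
  simpa using PySem.List.foldl_append_if_eq_filter
    (fun f => il.any (fun inclusion => PySem.Str.isIn inclusion f)) (l := ml) (acc := [])

-- membership after B's inner marking pass over one pattern
theorem si_mark_mem (l : List (Int × String)) (inc : String) (m : PySem.Set Int) (x : Int) :
    (x ∈ l.foldl (fun matched p =>
        if !(PySem.Set.contains matched p.1) && PySem.Str.isIn inc p.2
        then PySem.Set.add matched p.1 else matched) m)
      ↔ x ∈ m ∨ ∃ p ∈ l, x = p.1 ∧ PySem.Str.isIn inc p.2 = true := by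
  induction l generalizing m with
  | nil => simp
  | cons q t ih =>
      simp only [List.foldl_cons, List.exists_mem_cons_iff]
      cases hi : PySem.Str.isIn inc q.2 with
      | false =>
          simp only [Bool.and_false, Bool.false_eq_true, if_false, and_false, false_or, ih]
      | true =>
          cases hc : PySem.Set.contains m q.1 with
          | true =>
              simp only [Bool.not_true, Bool.false_and, Bool.false_eq_true, if_false, and_true, ih]
              have hqm : q.1 ∈ m := (PySem.Set.contains_iff m q.1).mp hc
              constructor
              · rintro (hm | h)
                · exact Or.inl hm
                · exact Or.inr (Or.inr h)
              · rintro (hm | rfl | h)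
                · exact Or.inl hm
                · exact Or.inl hqm
                · exact Or.inr h
          | false =>
              simp only [Bool.not_false, Bool.true_and, if_true, and_true, ih,
                PySem.Set.mem_add]
              tauto

-- membership in B's matched set after all patterns
theorem si_matched_mem (ml il : List String) (m : PySem.Set Int) (x : Int) :
    (x ∈ il.foldl (fun matched inclusion =>
        (PySem.List.enumerate ml).foldl (fun matched p =>
          if !(PySem.Set.contains matched p.1) && PySem.Str.isIn inclusion p.2
          then PySem.Set.add matched p.1 else matched) matched) m)
      ↔ x ∈ m ∨ ∃ inc ∈ il, ∃ p ∈ PySem.List.enumerate ml, x = p.1 ∧ PySem.Str.isIn inc p.2 = true := by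
  induction il generalizing m with
  | nil => simp
  | cons inc t ih =>
      simp only [List.foldl_cons, ih, si_mark_mem, List.exists_mem_cons_iff]
      rw [or_assoc]

-- on members of the enumeration, membership in the matched set is exactly "some pattern occurs"
theorem si_contains_matched (ml il : List String) (p : Int × String)
    (hp : p ∈ PySem.List.enumerate ml) :
    PySem.Set.contains
      (il.foldl (fun matched inclusion =>
        (PySem.List.enumerate ml).foldl (fun matched p =>
          if !(PySem.Set.contains matched p.1) && PySem.Str.isIn inclusion p.2
          then PySem.Set.add matched p.1 else matched) matched) PySem.Set.empty) p.1
      = il.any (fun inclusion => PySem.Str.isIn inclusion p.2) := by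
  obtain ⟨k, hk, hpk⟩ := (PySem.List.mem_enumerate_iff _ _ _).mp hp
  rw [Bool.eq_iff_iff, PySem.Set.contains_iff, si_matched_mem, List.any_eq_true]
  constructor
  · rintro (hm | ⟨inc, hinc, q, hq, hxq, hin⟩)
    · simp [PySem.Set.empty] at hm
    · obtain ⟨k', hk', hqk'⟩ := (PySem.List.mem_enumerate_iff _ _ _).mp hq
      have hkk : k = k' := by
        have := hxq
        rw [hpk, hqk'] at this
        simpa using this
      subst hkk
      refine ⟨inc, hinc, ?_⟩
      rw [hqk'] at hin
      rw [hpk]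
      simpa using hin
  · rintro ⟨inc, hinc, hin⟩
    exact Or.inr ⟨inc, hinc, p, hp, rfl, hin⟩

-- a filter of the enumeration by a predicate that only reads the element, projected back
theorem si_filter_enum (ml : List String) (c : Int × String → Bool) (P : String → Bool)
    (h : ∀ p ∈ PySem.List.enumerate ml, c p = P p.2) :
    ((PySem.List.enumerate ml).filter c).map (·.2) = ml.filter P := by
  rw [List.filter_congr h]
  conv_rhs => rw [← PySem.List.map_snd_enumerate ml (0 : Int), List.filter_map]
  rfl

theorem si_B_eq_filter (ml il : List String) :
    substring_inclusion_alt ml il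
      = ml.filter (fun f => il.any (fun inclusion => PySem.Str.isIn inclusion f)) := by
  exact si_filter_enum ml _ _ (fun p hp => si_contains_matched ml il p hp)

-- ===== VERDICT (by name: the statement is the Claim_ definition above) =====
theorem substring_inclusion_spec : Claim_equal_substring_inclusion := by
  intro ml il _
  unfold Spec_substring_inclusion
  rw [si_A_eq_filter, si_B_eq_filter]
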